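-- pv_equiv track=rewrite | github.com/posl/comment_recommendation | script/mod_gen/4_time/zh/119_C/6.py | dfs
-- ===== SOURCE A (Python) =====
-- def dfs(a, b, c, mp, l, n, i):
--     if i == n:
--         if a == 0 or b == 0 or c == 0:
--             return 10**9
--         else:
--             return mp - 30
--     else:
--         mp1 = dfs(a, b, c, mp, l, n, i + 1)
--         mp2 = dfs(a - l[i], b, c, mp + 10, l, n, i + 1)
--         mp3 = dfs(a, b - l[i], c, mp + 10, l, n, i + 1)
--         mp4 = dfs(a, b, c - l[i], mp + 10, l, n, i + 1)
--         return min(mp1, mp2, mp3, mp4)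
-- ===== SOURCE B (Python) =====
-- def dfs(a, b, c, mp, l, n, i):
--     memo = {}
--
--     def go(a, b, c, mp, i):
--         if i == n:
--             if a == 0 or b == 0 or c == 0:
--                 return 10 ** 9
--             return mp - 30
--         key = (a, b, c, mp, i)
--         if key not in memo:
--             x = l[i]
--             memo[key] = min(go(a, b, c, mp, i + 1),
--                             go(a - x, b, c, mp + 10, i + 1),
--                             go(a, b - x, c, mp + 10, i + 1),
--                             go(a, b, c - x, mp + 10, i + 1))
--         return memo[key]
--
--     return go(a, b, c, mp, i)
-- ===== Notes on version B (the rewrite author's own statement) =====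
-- stated objective: alternative
-- what changed: Replaces the naive four-way branching recursion by top-down dynamic programming: a memo table keyed by the state (a, b, c, mp, i) so each reachable state is solved once instead of once per path; Pre_ excludes only inputs on which A raises (i > n, or an index in i..n-1 out of range for l).
import Mathlib
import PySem

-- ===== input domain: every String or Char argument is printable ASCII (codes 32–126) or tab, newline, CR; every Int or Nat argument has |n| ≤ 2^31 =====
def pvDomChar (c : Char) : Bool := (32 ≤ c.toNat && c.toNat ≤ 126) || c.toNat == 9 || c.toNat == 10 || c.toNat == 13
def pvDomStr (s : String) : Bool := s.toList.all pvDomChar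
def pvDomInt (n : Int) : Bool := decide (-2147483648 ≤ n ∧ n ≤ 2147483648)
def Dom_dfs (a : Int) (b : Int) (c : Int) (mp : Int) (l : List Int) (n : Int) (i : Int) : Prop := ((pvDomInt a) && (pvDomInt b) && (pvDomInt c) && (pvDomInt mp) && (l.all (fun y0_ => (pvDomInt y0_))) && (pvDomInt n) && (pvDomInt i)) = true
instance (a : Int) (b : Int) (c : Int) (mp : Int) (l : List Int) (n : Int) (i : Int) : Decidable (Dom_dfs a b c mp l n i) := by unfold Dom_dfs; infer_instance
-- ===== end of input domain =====

-- B replaces A's naive four-way branching recursion by top-down dynamic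
-- programming (a memo table keyed by the state (a,b,c,mp,i)); same return value.

-- ===== PORT A =====
def dfs (a : Int) (b : Int) (c : Int) (mp : Int) (l : List Int) (n : Int) (i : Int) : Int :=
  if i = n then
    if a = 0 ∨ b = 0 ∨ c = 0 then 1000000000 else mp - 30
  else if n ≤ i then 0   -- totality guard only: here Python recurses until it raises (excluded by Pre_)
  else
    let x := (PySem.List.pyGet? l i).getD 0   -- l[i]; none = IndexError, excluded by Pre_
    let mp1 := dfs a b c mp l n (i + 1)
    let mp2 := dfs (a - x) b c (mp + 10) l n (i + 1)
    let mp3 := dfs a (b - x) c (mp + 10) l n (i + 1)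
    let mp4 := dfs a b (c - x) (mp + 10) l n (i + 1)
    min (min (min mp1 mp2) mp3) mp4
termination_by (n - i).toNat
decreasing_by all_goals omega

-- ===== PORT B =====
-- the inner 'go', threading the memo dict through the four recursive calls in order.
-- 'fuel' only makes the recursion structural: the call below passes (n - i).toNat,
-- which never runs out where Python returns (it runs out only when i > n, where
-- Python recurses until it raises; excluded by Pre_).
def dfsGo (l : List Int) (n : Int) (fuel : Nat) (a : Int) (b : Int) (c : Int) (mp : Int) (i : Int)
    (memo : PySem.Dict (Int × Int × Int × Int × Int) Int) :
    Int × PySem.Dict (Int × Int × Int × Int × Int) Int :=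
  if i = n then
    (if a = 0 ∨ b = 0 ∨ c = 0 then 1000000000 else mp - 30, memo)
  else
    match fuel with
    | 0 => (0, memo)
    | fuel + 1 =>
      match memo.get? (a, b, c, mp, i) with
      | some v => (v, memo)
      | none =>
        let x := (PySem.List.pyGet? l i).getD 0   -- l[i]; none = IndexError, excluded by Pre_
        let r1 := dfsGo l n fuel a b c mp (i + 1) memo
        let r2 := dfsGo l n fuel (a - x) b c (mp + 10) (i + 1) r1.2
        let r3 := dfsGo l n fuel a (b - x) c (mp + 10) (i + 1) r2.2
        let r4 := dfsGo l n fuel a b (c - x) (mp + 10) (i + 1) r3.2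
        let res := min (min (min r1.1 r2.1) r3.1) r4.1
        (res, r4.2.insert (a, b, c, mp, i) res)

def dfs_alt (a : Int) (b : Int) (c : Int) (mp : Int) (l : List Int) (n : Int) (i : Int) : Int :=
  (dfsGo l n (n - i).toNat a b c mp i PySem.Dict.empty).1

-- ===== PRECONDITION & SPEC =====
-- Pre_ is exactly where Python A returns: i ≤ n (otherwise the recursion never
-- reaches its base case and eventually raises) and, unless i = n (no index is
-- touched), every index i..n-1 must be valid for l, Python negative indices included.
def Pre_dfs (a : Int) (b : Int) (c : Int) (mp : Int) (l : List Int) (n : Int) (i : Int) : Prop :=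
  i ≤ n ∧ (i = n ∨ (-(l.length : Int) ≤ i ∧ n ≤ (l.length : Int)))
instance (a : Int) (b : Int) (c : Int) (mp : Int) (l : List Int) (n : Int) (i : Int) : Decidable (Pre_dfs a b c mp l n i) := by unfold Pre_dfs; infer_instance
def pvWitness_dfs : Int × Int × Int × Int × List Int × Int × Int := (1, 2, 3, 0, [1, 2, 3], 3, 0)

def Spec_dfs (a : Int) (b : Int) (c : Int) (mp : Int) (l : List Int) (n : Int) (i : Int) (out : Int) : Prop := out = dfs_alt a b c mp l n i
instance (a : Int) (b : Int) (c : Int) (mp : Int) (l : List Int) (n : Int) (i : Int) (out : Int) : Decidable (Spec_dfs a b c mp l n i out) := by unfold Spec_dfs; infer_instance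

-- ===== CLAIM (what is proved, stated in full; the proofs are below) =====
def Claim_equal_dfs : Prop := ∀ (a : Int) (b : Int) (c : Int) (mp : Int) (l : List Int) (n : Int) (i : Int), Dom_dfs a b c mp l n i → Pre_dfs a b c mp l n i → Spec_dfs a b c mp l n i (dfs a b c mp l n i)

-- ===== LEMMAS AND PROOFS =====

-- memo invariant: every cached value is the corresponding dfs value
def MemoOK (l : List Int) (n : Int) (memo : PySem.Dict (Int × Int × Int × Int × Int) Int) : Prop :=
  ∀ (a b c mp i v : Int), memo.get? (a, b, c, mp, i) = some v → v = dfs a b c mp l n i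

theorem dfsGo_correct (l : List Int) (n : Int) : ∀ (fuel : Nat) (a b c mp i : Int)
    (memo : PySem.Dict (Int × Int × Int × Int × Int) Int), (n - i).toNat ≤ fuel → MemoOK l n memo →
    (dfsGo l n fuel a b c mp i memo).1 = dfs a b c mp l n i ∧
      MemoOK l n (dfsGo l n fuel a b c mp i memo).2 := by
  intro fuel
  induction fuel with
  | zero =>
    intro a b c mp i memo hf h
    by_cases h1 : i = n
    · rw [dfsGo, if_pos h1, dfs, if_pos h1]
      exact ⟨rfl, h⟩
    · have h2 : n ≤ i := by omega
      rw [dfsGo, if_neg h1, dfs, if_neg h1, if_pos h2]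
      exact ⟨rfl, h⟩
  | succ fuel ih =>
    intro a b c mp i memo hf h
    by_cases h1 : i = n
    · rw [dfsGo, if_pos h1, dfs, if_pos h1]
      exact ⟨rfl, h⟩
    · rw [dfsGo, if_neg h1]
      cases hm : memo.get? (a, b, c, mp, i) with
      | some v => exact ⟨h a b c mp i v hm, h⟩
      | none =>
        have hf' : (n - (i + 1)).toNat ≤ fuel := by omega
        obtain ⟨e1, k1⟩ := ih a b c mp (i + 1) memo hf' h
        obtain ⟨e2, k2⟩ := ih (a - (PySem.List.pyGet? l i).getD 0) b c (mp + 10) (i + 1) _ hf' k1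
        obtain ⟨e3, k3⟩ := ih a (b - (PySem.List.pyGet? l i).getD 0) c (mp + 10) (i + 1) _ hf' k2
        obtain ⟨e4, k4⟩ := ih a b (c - (PySem.List.pyGet? l i).getD 0) (mp + 10) (i + 1) _ hf' k3
        have hval : min (min (min (dfsGo l n fuel a b c mp (i + 1) memo).1
              (dfsGo l n fuel (a - (PySem.List.pyGet? l i).getD 0) b c (mp + 10) (i + 1)
                (dfsGo l n fuel a b c mp (i + 1) memo).2).1)
              (dfsGo l n fuel a (b - (PySem.List.pyGet? l i).getD 0) c (mp + 10) (i + 1)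
                (dfsGo l n fuel (a - (PySem.List.pyGet? l i).getD 0) b c (mp + 10) (i + 1)
                  (dfsGo l n fuel a b c mp (i + 1) memo).2).2).1)
              (dfsGo l n fuel a b (c - (PySem.List.pyGet? l i).getD 0) (mp + 10) (i + 1)
                (dfsGo l n fuel a (b - (PySem.List.pyGet? l i).getD 0) c (mp + 10) (i + 1)
                  (dfsGo l n fuel (a - (PySem.List.pyGet? l i).getD 0) b c (mp + 10) (i + 1)
                    (dfsGo l n fuel a b c mp (i + 1) memo).2).2).2).1
            = dfs a b c mp l n i := by
          rw [e1, e2, e3, e4]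
          by_cases h2 : n ≤ i
          · have hz : ∀ (a' b' c' mp' : Int), dfs a' b' c' mp' l n (i + 1) = 0 := by
              intro a' b' c' mp'
              rw [dfs, if_neg (by omega : ¬ i + 1 = n), if_pos (by omega : n ≤ i + 1)]
            conv_rhs => rw [dfs]
            rw [if_neg h1, if_pos h2, hz, hz, hz, hz]
            simp
          · conv_rhs => rw [dfs]
            rw [if_neg h1, if_neg h2]
        refine ⟨hval, ?_⟩
        intro a' b' c' mp' i' v hv
        have hv' : ((dfsGo l n fuel a b (c - (PySem.List.pyGet? l i).getD 0) (mp + 10) (i + 1)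
              (dfsGo l n fuel a (b - (PySem.List.pyGet? l i).getD 0) c (mp + 10) (i + 1)
                (dfsGo l n fuel (a - (PySem.List.pyGet? l i).getD 0) b c (mp + 10) (i + 1)
                  (dfsGo l n fuel a b c mp (i + 1) memo).2).2).2).2.insert (a, b, c, mp, i)
              (min (min (min (dfsGo l n fuel a b c mp (i + 1) memo).1
                (dfsGo l n fuel (a - (PySem.List.pyGet? l i).getD 0) b c (mp + 10) (i + 1)
                  (dfsGo l n fuel a b c mp (i + 1) memo).2).1)
                (dfsGo l n fuel a (b - (PySem.List.pyGet? l i).getD 0) c (mp + 10) (i + 1)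
                  (dfsGo l n fuel (a - (PySem.List.pyGet? l i).getD 0) b c (mp + 10) (i + 1)
                    (dfsGo l n fuel a b c mp (i + 1) memo).2).2).1)
                (dfsGo l n fuel a b (c - (PySem.List.pyGet? l i).getD 0) (mp + 10) (i + 1)
                  (dfsGo l n fuel a (b - (PySem.List.pyGet? l i).getD 0) c (mp + 10) (i + 1)
                    (dfsGo l n fuel (a - (PySem.List.pyGet? l i).getD 0) b c (mp + 10) (i + 1)
                      (dfsGo l n fuel a b c mp (i + 1) memo).2).2).2).1)).get?
              (a', b', c', mp', i') = some v := hv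
        rw [PySem.Dict.get?_insert] at hv'
        by_cases hk : ((a', b', c', mp', i') : Int × Int × Int × Int × Int) = (a, b, c, mp, i)
        · rw [if_pos hk] at hv'
          obtain ⟨ha, hb, hc, hmp, hi⟩ : a' = a ∧ b' = b ∧ c' = c ∧ mp' = mp ∧ i' = i := by
            simpa [Prod.ext_iff] using hk
          subst ha; subst hb; subst hc; subst hmp; subst hi
          exact Option.some.inj hv' ▸ hval
        · rw [if_neg hk] at hv'
          exact k4 a' b' c' mp' i' v hv'

theorem memoOK_empty (l : List Int) (n : Int) : MemoOK l n PySem.Dict.empty := by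
  intro a b c mp i v hv
  simp [PySem.Dict.get?_empty] at hv

-- ===== VERDICT (by name: the statement is the Claim_ definition above) =====
theorem dfs_spec : Claim_equal_dfs := by
  unfold Claim_equal_dfs
  intro a b c mp l n i _ _
  unfold Spec_dfs dfs_alt
  exact ((dfsGo_correct l n (n - i).toNat a b c mp i PySem.Dict.empty le_rfl (memoOK_empty l n)).1).symm
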